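-- pv_equiv track=rewrite | github.com/limodou/ulipad | mixins/mDuplicate.py | findLeftWord
-- ===== SOURCE A (Python) =====
-- def findLeftWord(text, pos, word_chars):
--     """if just left char is '.' or '(', etc. then continue to search, other case stop searching"""
--     edge_chars = '.[('
--     chars = []
--     leftchar = text[pos - 1]
--     if leftchar in edge_chars:
--         chars.append(leftchar)
--         pos -= 1
--
--     while pos > 0:
--         leftchar = text[pos - 1]
--         if leftchar in word_chars:
--             pos -= 1
--             chars.append(leftchar)
--         else:
--             break
--     chars.reverse()
--     return ''.join(chars)
-- ===== SOURCE B (Python) =====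
-- import re
--
-- def findLeftWord(text, pos, word_chars):
--     """Same result as A: the run of word_chars ending at pos, plus a trailing '.', '[' or '(' edge char."""
--     suffix = ''
--     leftchar = text[pos - 1]
--     if leftchar in '.[(':
--         suffix = leftchar
--         pos -= 1
--     seg = text[:pos] if pos > 0 else ''
--     if not word_chars:
--         return suffix
--     run = re.search('[' + re.escape(word_chars) + ']*\Z', seg).group()
--     return run + suffix
-- ===== Notes on version B (the rewrite author's own statement) =====
-- stated objective: idiomatic
-- what changed: Replaces the manual accumulate-and-reverse while loop with a sliced segment text[:pos] and an end-anchored regex character-class match that extracts the trailing run of word_chars in one call.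
import Mathlib
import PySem

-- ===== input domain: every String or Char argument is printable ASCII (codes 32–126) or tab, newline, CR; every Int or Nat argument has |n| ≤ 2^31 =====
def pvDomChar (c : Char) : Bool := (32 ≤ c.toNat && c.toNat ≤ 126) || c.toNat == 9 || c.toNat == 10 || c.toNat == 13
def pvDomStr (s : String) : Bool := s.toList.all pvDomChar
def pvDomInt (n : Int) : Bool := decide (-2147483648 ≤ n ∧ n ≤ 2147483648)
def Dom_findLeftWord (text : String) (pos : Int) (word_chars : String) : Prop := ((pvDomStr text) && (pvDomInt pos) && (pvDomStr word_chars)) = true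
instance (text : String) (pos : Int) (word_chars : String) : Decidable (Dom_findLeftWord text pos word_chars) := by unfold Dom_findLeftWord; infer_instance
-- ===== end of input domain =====

-- B extracts the same trailing word-run with a slice + end-anchored regex instead of A's
-- accumulate-and-reverse while loop (objective: idiomatic; same asymptotic cost).

-- ===== PORT A =====
-- while pos > 0: leftchar = text[pos-1]; if leftchar in word_chars: pos -= 1; chars.append(leftchar) else break
-- (the loop counter is pos; under Pre_ it stays ≤ len(text), so the none branch is unreachable)
def findLeftWordLoop (tl wc : List Char) : Nat → List Char → List Char
  | 0, chars => chars
  | p + 1, chars =>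
    match tl[p]? with
    | some leftchar =>
        if wc.contains leftchar then findLeftWordLoop tl wc p (chars ++ [leftchar])
        else chars
    | none => chars

def findLeftWord (text : String) (pos : Int) (word_chars : String) : String :=
  match PySem.Str.pyGet? text (pos - 1) with
  | none => ""  -- Python raises IndexError here; excluded by Pre_findLeftWord
  | some leftchar =>
    let (chars, pos) :=
      if ['.', '[', '('].contains leftchar then ([leftchar], pos - 1) else (([] : List Char), pos)
    let chars := findLeftWordLoop text.toList word_chars.toList pos.toNat chars
    String.ofList chars.reverse

-- ===== PORT B =====
-- re.search('[' + re.escape(word_chars) + ']*\Z', seg).group() yields the maximal trailing run of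
-- characters of word_chars in seg; ported as takeWhile on the reversed segment, reversed back.
def findLeftWord_alt (text : String) (pos : Int) (word_chars : String) : String :=
  match PySem.Str.pyGet? text (pos - 1) with
  | none => ""  -- Python raises IndexError here; excluded by Pre_findLeftWord
  | some leftchar =>
    let (suffix, pos) :=
      if ['.', '[', '('].contains leftchar then ([leftchar], pos - 1) else (([] : List Char), pos)
    let seg := if pos > 0 then text.toList.take pos.toNat else []
    if word_chars.toList = [] then String.ofList suffix
    else
      let run := (seg.reverse.takeWhile (word_chars.toList.contains ·)).reverse
      String.ofList (run ++ suffix)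

-- ===== PRECONDITION & SPEC =====
-- Pre_ excludes exactly the inputs where text[pos-1] raises IndexError (in both A and B).
def Pre_findLeftWord (text : String) (pos : Int) (word_chars : String) : Prop :=
  -(text.length : Int) ≤ pos - 1 ∧ pos - 1 < (text.length : Int)
instance (text : String) (pos : Int) (word_chars : String) : Decidable (Pre_findLeftWord text pos word_chars) := by unfold Pre_findLeftWord; infer_instance

def pvWitness_findLeftWord : String × Int × String := ("foo.bar", 7, "abcdefghijklmnopqrstuvwxyz")

def Spec_findLeftWord (text : String) (pos : Int) (word_chars : String) (out : String) : Prop := out = findLeftWord_alt text pos word_chars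
instance (text : String) (pos : Int) (word_chars : String) (out : String) : Decidable (Spec_findLeftWord text pos word_chars out) := by unfold Spec_findLeftWord; infer_instance

-- ===== CLAIM (what is proved, stated in full; the proofs are below) =====
def Claim_equal_findLeftWord : Prop := ∀ (text : String) (pos : Int) (word_chars : String), Dom_findLeftWord text pos word_chars → Pre_findLeftWord text pos word_chars → Spec_findLeftWord text pos word_chars (findLeftWord text pos word_chars)

-- ===== LEMMAS AND PROOFS =====

-- A's loop, started at p ≤ tl.length, appends the reversed maximal trailing run of (tl.take p).
theorem findLeftWordLoop_eq (tl wc : List Char) :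
    ∀ (p : Nat), p ≤ tl.length → ∀ (acc : List Char),
      findLeftWordLoop tl wc p acc = acc ++ (tl.take p).reverse.takeWhile (wc.contains ·) := by
  intro p
  induction p with
  | zero => intro _ acc; simp [findLeftWordLoop]
  | succ q ih =>
    intro hp acc
    have hq : q < tl.length := by omega
    have htake : (tl.take (q + 1)).reverse = tl[q] :: (tl.take q).reverse := by
      rw [List.take_add_one]
      simp [List.getElem?_eq_getElem hq]
    rw [findLeftWordLoop, List.getElem?_eq_getElem hq, htake]
    dsimp only
    by_cases hc : wc.contains tl[q]
    · rw [if_pos hc, ih (by omega), List.takeWhile_cons_of_pos hc]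
      have hfun : (fun x => decide (x ∈ wc)) = (wc.contains ·) := by
        funext x; simp [List.contains_eq_mem]
      simp [hfun]
    · rw [if_neg hc, List.takeWhile_cons_of_neg (by simpa using hc)]
      simp

theorem findLeftWord_eq_alt (text : String) (pos : Int) (word_chars : String)
    (hpre : Pre_findLeftWord text pos word_chars) :
    findLeftWord text pos word_chars = findLeftWord_alt text pos word_chars := by
  obtain ⟨h1, h2⟩ := hpre
  have hlen : text.toList.length = text.length := by simp
  obtain ⟨leftchar, hl⟩ : ∃ c, PySem.Str.pyGet? text (pos - 1) = some c := by
    rcases hx : PySem.Str.pyGet? text (pos - 1) with _ | c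
    · exfalso
      rw [PySem.Str.pyGet?_eq, PySem.Chars.pyGet?_eq_listPyGet?,
        PySem.List.pyGet?_eq_none_iff] at hx
      exact hx ⟨by omega, by omega⟩
    · exact ⟨c, rfl⟩
  have key : ∀ (p : Int) (s : List Char), p ≤ (text.length : Int) → s.reverse = s →
      String.ofList (findLeftWordLoop text.toList word_chars.toList p.toNat s).reverse
        = (if word_chars.toList = [] then String.ofList s
           else String.ofList
             (((if p > 0 then text.toList.take p.toNat else []).reverse.takeWhile
                 (word_chars.toList.contains ·)).reverse ++ s)) := by
    intro p s hp hs
    have hpn : p.toNat ≤ text.toList.length := by omega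
    have hseg : (if p > 0 then text.toList.take p.toNat else []) = text.toList.take p.toNat := by
      split
      · rfl
      · have : p.toNat = 0 := by omega
        rw [this, List.take_zero]
    rw [findLeftWordLoop_eq text.toList word_chars.toList p.toNat hpn s, hseg,
      List.reverse_append, hs]
    by_cases hwc : word_chars.toList = []
    · simp [hwc]
    · rw [if_neg hwc]
  unfold findLeftWord findLeftWord_alt
  rw [hl]
  by_cases hedge : ['.', '[', '('].contains leftchar
  · simp only [hedge, if_true]
    exact key (pos - 1) [leftchar] (by omega) rfl
  · simp only [hedge, Bool.false_eq_true, if_false]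
    exact key pos [] (by omega) rfl

-- ===== VERDICT (by name: the statement is the Claim_ definition above) =====
theorem findLeftWord_spec : Claim_equal_findLeftWord := by
  intro text pos word_chars _ hpre
  exact findLeftWord_eq_alt text pos word_chars hpre
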